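-- pv_equiv track=rewrite | github.com/JianjunJin/Traversome | traversome/utils.py | get_orf_lengths
-- ===== SOURCE A (Python) =====
-- CLASSIC_START_CODONS = {"ATG", "ATC", "ATA", "ATT", "GTG", "TTG"}
--
-- CLASSIC_STOP_CODONS = {"TAA", "TAG", "TGA"}
--
-- def get_orf_lengths(sequence_string, threshold=200, which_frame=None,
--                     here_stop_codons=None, here_start_codons=None):
--     """
--     :param sequence_string:
--     :param threshold: default: 200
--     :param which_frame: 1, 2, 3, or None
--     :param here_stop_codons: default: CLASSIC_STOP_CODONS
--     :param here_start_codons: default: CLASSIC_START_CODONS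
--     :return: [len_orf1, len_orf2, len_orf3 ...] # longest accumulated orfs among all frame choices
--     """
--     assert which_frame in {0, 1, 2, None}
--     if which_frame is None:
--         test_frames = [0, 1, 2]
--     else:
--         test_frames = [which_frame]
--     if here_start_codons is None:
--         here_start_codons = CLASSIC_START_CODONS
--     if here_stop_codons is None:
--         here_stop_codons = CLASSIC_STOP_CODONS
--     orf_lengths = {}
--     for try_frame in test_frames:
--         orf_lengths[try_frame] = []
--         this_start = False
--         for go in range(try_frame, len(sequence_string), 3):
--             if this_start:
--                 if sequence_string[go:go + 3] not in here_stop_codons: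
--                     orf_lengths[try_frame][-1] += 3
--                 else:
--                     if orf_lengths[try_frame][-1] < threshold:
--                         del orf_lengths[try_frame][-1]
--                     this_start = False
--             else:
--                 if sequence_string[go:go + 3] in here_start_codons:
--                     orf_lengths[try_frame].append(3)
--                     this_start = True
--                 else:
--                     pass
--     return sorted(orf_lengths.values(), key=lambda x: -sum(x))[0]
-- ===== SOURCE B (Python) =====
-- CLASSIC_START_CODONS = {"ATG", "ATC", "ATA", "ATT", "GTG", "TTG"}
--
-- CLASSIC_STOP_CODONS = {"TAA", "TAG", "TGA"}
--
--
-- def _frame_orfs(codons, stop_codons, start_codons, threshold):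
--     """ORF lengths in one frame: jump to the first start codon, then scan
--     ahead to the terminating stop codon and record the length directly."""
--     res = []
--     n = len(codons)
--     i = 0
--     while i < n:
--         if codons[i] in start_codons:
--             length = 3
--             k = i + 1
--             while k < n and codons[k] not in stop_codons:
--                 length += 3
--                 k += 1
--             if k == n:
--                 # runs off the end of the frame: kept whatever its length
--                 res.append(length)
--                 return res
--             if length >= threshold:
--                 res.append(length)
--             i = k + 1
--         else:
--             i += 1
--     return res
--
--
-- def get_orf_lengths(sequence_string, threshold=200, which_frame=None,
--                     here_stop_codons=None, here_start_codons=None):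
--     assert which_frame in {0, 1, 2, None}
--     frames = [0, 1, 2] if which_frame is None else [which_frame]
--     if here_start_codons is None:
--         here_start_codons = CLASSIC_START_CODONS
--     if here_stop_codons is None:
--         here_stop_codons = CLASSIC_STOP_CODONS
--     best = None
--     best_sum = 0
--     for frame in frames:
--         codons = [sequence_string[i:i + 3]
--                   for i in range(frame, len(sequence_string), 3)]
--         lens = _frame_orfs(codons, here_stop_codons, here_start_codons,
--                            threshold)
--         s = sum(lens)
--         if best is None or s > best_sum:
--             best, best_sum = lens, s
--     return best
-- ===== Notes on version B (the rewrite author's own statement) =====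
-- stated objective: alternative
-- what changed: A scans every codon with a mutable state machine that grows/deletes the last entry of a per-frame list and picks the best frame via a stable sort on -sum; B instead, per frame, jumps to the next start codon, scans ahead to its terminating stop codon and records the ORF length once, and keeps the best frame with a single strict-improvement fold (ties go to the lowest frame).
import Mathlib
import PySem

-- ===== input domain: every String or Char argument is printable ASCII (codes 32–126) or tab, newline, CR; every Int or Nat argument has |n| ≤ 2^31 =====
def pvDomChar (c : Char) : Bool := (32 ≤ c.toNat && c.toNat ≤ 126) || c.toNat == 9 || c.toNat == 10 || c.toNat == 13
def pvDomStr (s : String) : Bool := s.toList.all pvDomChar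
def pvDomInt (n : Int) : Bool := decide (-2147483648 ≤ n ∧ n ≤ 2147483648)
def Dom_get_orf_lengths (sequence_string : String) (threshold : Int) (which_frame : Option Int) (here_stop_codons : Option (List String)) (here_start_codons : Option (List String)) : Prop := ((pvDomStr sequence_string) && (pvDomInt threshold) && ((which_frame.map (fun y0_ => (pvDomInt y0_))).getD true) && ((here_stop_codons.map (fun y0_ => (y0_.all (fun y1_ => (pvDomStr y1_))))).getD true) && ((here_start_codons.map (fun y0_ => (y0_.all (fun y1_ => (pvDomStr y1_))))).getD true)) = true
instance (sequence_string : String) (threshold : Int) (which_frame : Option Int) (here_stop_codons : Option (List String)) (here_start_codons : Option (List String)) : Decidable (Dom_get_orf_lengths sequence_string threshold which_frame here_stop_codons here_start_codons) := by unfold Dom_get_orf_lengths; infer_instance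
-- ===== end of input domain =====

-- B replaces A's per-codon mutable-state scan (grow/delete the last list entry) by a
-- two-pointer jump per frame: find the next start codon, scan ahead to its stop, record
-- the length once; same return value, different decomposition (objective: alternative).

-- ===== PORT A =====
-- Python set literals CLASSIC_START_CODONS / CLASSIC_STOP_CODONS: only membership is
-- ever tested, so they are carried as the lists of their distinct elements.
def pvClassicStarts : List String := ["ATG", "ATC", "ATA", "ATT", "GTG", "TTG"]
def pvClassicStops : List String := ["TAA", "TAG", "TGA"]

-- the inner 'for go in range(try_frame, len, 3)' loop of A; it reads and writes only
-- the dict entry orf_lengths[try_frame], so its state is that entry's list plus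
-- this_start, written back to the dict after the loop
def pvInnerA (sequence_string : String) (threshold : Int)
    (stop_codons start_codons : List String) (try_frame : Int) : List Int × Bool :=
  (PySem.List.pyRange try_frame (PySem.Str.len sequence_string) 3).foldl
    (fun (st : List Int × Bool) go =>
      let codon := PySem.Str.slice sequence_string (some go) (some (go + 3))
      if st.2 then
        if !(stop_codons.contains codon) then
          -- orf_lengths[try_frame][-1] += 3 (the list is nonempty whenever this_start)
          (st.1.dropLast ++ [st.1.getLastD 0 + 3], true)
        else
          if st.1.getLastD 0 < threshold then
            (st.1.dropLast, false)                     -- del orf_lengths[try_frame][-1]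
          else
            (st.1, false)
      else
        if start_codons.contains codon then
          (st.1 ++ [3], true)
        else
          st)
    ([], false)

def get_orf_lengths (sequence_string : String) (threshold : Int) (which_frame : Option Int) (here_stop_codons : Option (List String)) (here_start_codons : Option (List String)) : List Int :=
  -- assert which_frame in {0,1,2,None}: raises otherwise; excluded by Pre_get_orf_lengths
  let test_frames : List Int := match which_frame with
    | none => [0, 1, 2]
    | some f => [f]
  let here_start_codons := here_start_codons.getD pvClassicStarts
  let here_stop_codons := here_stop_codons.getD pvClassicStops
  let orf_lengths : PySem.Dict Int (List Int) :=
    test_frames.foldl (fun d try_frame =>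
      let d := PySem.Dict.insert d try_frame []      -- orf_lengths[try_frame] = []
      let st := pvInnerA sequence_string threshold here_stop_codons here_start_codons try_frame
      PySem.Dict.insert d try_frame st.1) PySem.Dict.empty
  -- sorted(values, key=-sum)[0]: values is nonempty (test_frames is), so [0] never raises
  PySem.List.pyGetD
    (PySem.List.sorted (PySem.Dict.values orf_lengths) (fun x => -(x.sum)) false) 0 []

-- ===== PORT B =====
-- _frame_orfs: the outer while (seek a start codon) and the inner while (scan to the
-- stop, counting length) of Source B, as recursion over the codon-list suffix the index
-- i / k points at.
mutual
def pvSeek (stop_codons start_codons : List String) (threshold : Int) : List String → List Int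
  | [] => []
  | c :: rest =>
    if start_codons.contains c then
      pvScan stop_codons start_codons threshold 3 rest
    else
      pvSeek stop_codons start_codons threshold rest

def pvScan (stop_codons start_codons : List String) (threshold : Int) (length : Int) : List String → List Int
  | [] => [length]       -- k == n: runs off the end of the frame, kept unconditionally
  | c :: rest =>
    if stop_codons.contains c then
      if threshold ≤ length then
        length :: pvSeek stop_codons start_codons threshold rest
      else
        pvSeek stop_codons start_codons threshold rest
    else
      pvScan stop_codons start_codons threshold (length + 3) rest
end

def get_orf_lengths_alt (sequence_string : String) (threshold : Int) (which_frame : Option Int) (here_stop_codons : Option (List String)) (here_start_codons : Option (List String)) : List Int :=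
  -- assert which_frame in {0,1,2,None}: raises otherwise; excluded by Pre_get_orf_lengths
  let frames : List Int := match which_frame with
    | none => [0, 1, 2]
    | some f => [f]
  let here_start_codons := here_start_codons.getD pvClassicStarts
  let here_stop_codons := here_stop_codons.getD pvClassicStops
  let best : Option (List Int) × Int :=
    frames.foldl (fun best frame =>
      let codons := (PySem.List.pyRange frame (PySem.Str.len sequence_string) 3).map
        (fun i => PySem.Str.slice sequence_string (some i) (some (i + 3)))
      let lens := pvSeek here_stop_codons here_start_codons threshold codons
      let s := lens.sum
      match best.1 with
      | none => (some lens, s)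
      | some _ => if best.2 < s then (some lens, s) else best) (none, 0)
  best.1.getD []          -- frames is nonempty, so best is never None

-- ===== PRECONDITION & SPEC =====
-- Pre_ excludes exactly the inputs on which A's assert fires (AssertionError):
-- which_frame must be None, 0, 1 or 2.
def Pre_get_orf_lengths (sequence_string : String) (threshold : Int) (which_frame : Option Int) (here_stop_codons : Option (List String)) (here_start_codons : Option (List String)) : Prop :=
  which_frame = none ∨ which_frame = some 0 ∨ which_frame = some 1 ∨ which_frame = some 2
instance (sequence_string : String) (threshold : Int) (which_frame : Option Int) (here_stop_codons : Option (List String)) (here_start_codons : Option (List String)) : Decidable (Pre_get_orf_lengths sequence_string threshold which_frame here_stop_codons here_start_codons) := by unfold Pre_get_orf_lengths; infer_instance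

def pvWitness_get_orf_lengths : String × Int × Option Int × Option (List String) × Option (List String) :=
  ("ATGAAATAA", 6, none, none, none)

def Spec_get_orf_lengths (sequence_string : String) (threshold : Int) (which_frame : Option Int) (here_stop_codons : Option (List String)) (here_start_codons : Option (List String)) (out : List Int) : Prop := out = get_orf_lengths_alt sequence_string threshold which_frame here_stop_codons here_start_codons
instance (sequence_string : String) (threshold : Int) (which_frame : Option Int) (here_stop_codons : Option (List String)) (here_start_codons : Option (List String)) (out : List Int) : Decidable (Spec_get_orf_lengths sequence_string threshold which_frame here_stop_codons here_start_codons out) := by unfold Spec_get_orf_lengths; infer_instance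

-- ===== CLAIM (what is proved, stated in full; the proofs are below) =====
def Claim_equal_get_orf_lengths : Prop := ∀ (sequence_string : String) (threshold : Int) (which_frame : Option Int) (here_stop_codons : Option (List String)) (here_start_codons : Option (List String)), Dom_get_orf_lengths sequence_string threshold which_frame here_stop_codons here_start_codons → Pre_get_orf_lengths sequence_string threshold which_frame here_stop_codons here_start_codons → Spec_get_orf_lengths sequence_string threshold which_frame here_stop_codons here_start_codons (get_orf_lengths sequence_string threshold which_frame here_stop_codons here_start_codons)

-- ===== LEMMAS AND PROOFS =====

-- A's inner-loop body, abstracted over the codon (the slice is fused out by List.foldl_map)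
def pvStepA (stop_codons start_codons : List String) (threshold : Int)
    (st : List Int × Bool) (codon : String) : List Int × Bool :=
  if st.2 then
    if !(stop_codons.contains codon) then
      (st.1.dropLast ++ [st.1.getLastD 0 + 3], true)
    else
      if st.1.getLastD 0 < threshold then (st.1.dropLast, false) else (st.1, false)
  else
    if start_codons.contains codon then (st.1 ++ [3], true) else st

-- Core invariant: A's scan over a codon list equals B's seek/scan recursion, for any
-- already-collected prefix acc (and, when an ORF is open, its current length L).
theorem pvCore (stops starts : List String) (thr : Int) (cs : List String) :
    (∀ acc : List Int,
        (cs.foldl (pvStepA stops starts thr) (acc, false)).1 =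
          acc ++ pvSeek stops starts thr cs) ∧
    (∀ (acc : List Int) (L : Int),
        (cs.foldl (pvStepA stops starts thr) (acc ++ [L], true)).1 =
          acc ++ pvScan stops starts thr L cs) := by
  induction cs with
  | nil => simp [pvSeek, pvScan]
  | cons c rest ih =>
    constructor
    · intro acc
      simp only [List.foldl_cons, pvStepA, pvSeek]
      by_cases hs : c ∈ starts
      · simpa [hs] using ih.2 acc 3
      · simpa [hs] using ih.1 acc
    · intro acc L
      simp only [List.foldl_cons, pvStepA, pvScan]
      by_cases hp : c ∈ stops
      · by_cases ht : thr ≤ L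
        · have h1 := ih.1 (acc ++ [L])
          simp only [List.append_assoc, List.cons_append, List.nil_append] at h1
          simp [hp, ht, not_lt.mpr ht, h1]
        · have h1 := ih.1 acc
          simp [hp, ht, not_le.mp ht, h1]
      · have h2 := ih.2 acc (L + 3)
        simp [hp, h2]

-- sorted of a one-element value list: the head is that element
theorem pvSel1 (a : List Int) :
    PySem.List.pyGetD (PySem.List.sorted [a] (fun x => -(x.sum)) false) 0 [] = a := by
  rw [PySem.List.sorted_eq_foldl_insertBy]
  simp [PySem.List.insertBy, PySem.List.pyGetD]

-- Head of A's stable sort of the three per-frame lists (key = -sum) equals B's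
-- strict-improvement fold over the frames.
theorem pvSel3 (a b c : List Int) :
    PySem.List.pyGetD (PySem.List.sorted [a, b, c] (fun x => -(x.sum)) false) 0 [] =
      (if a.sum < b.sum then (if b.sum < c.sum then c else b)
       else (if a.sum < c.sum then c else a)) := by
  rw [PySem.List.sorted_eq_foldl_insertBy]
  simp only [List.foldl_cons, List.foldl_nil, PySem.List.insertBy]
  by_cases h1 : a.sum < b.sum <;> by_cases h2 : b.sum < c.sum <;>
    by_cases h3 : a.sum < c.sum <;>
    simp [PySem.List.insertBy, h1, h2, h3, PySem.List.pyGetD]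

-- ===== VERDICT (by name: the statement is the Claim_ definition above) =====
theorem get_orf_lengths_spec : Claim_equal_get_orf_lengths := by
  intro s thr wf stops? starts? _hDom hPre
  unfold Spec_get_orf_lengths
  have key : ∀ (stops starts : List String) (f : Int),
      (pvInnerA s thr stops starts f).1
        = pvSeek stops starts thr
            ((PySem.List.pyRange f (PySem.Str.len s) 3).map
              (fun i => PySem.Str.slice s (some i) (some (i + 3)))) := by
    intro stops starts f
    have h : pvInnerA s thr stops starts f
        = ((PySem.List.pyRange f (PySem.Str.len s) 3).map
            (fun i => PySem.Str.slice s (some i) (some (i + 3)))).foldl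
            (pvStepA stops starts thr) ([], false) := by
      rw [pvInnerA, List.foldl_map]
      rfl
    rw [h]
    simpa using (pvCore stops starts thr _).1 []
  rcases hPre with h | h | h | h <;> subst h <;>
    simp [get_orf_lengths, get_orf_lengths_alt,
      PySem.Dict.insert, PySem.Dict.values, PySem.Dict.empty, key] <;>
    first
      | (rw [pvSel3]; split_ifs <;> rfl)
      | rw [pvSel1]
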